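-- pv_equiv track=rewrite | github.com/Nikolaevviktord/muntur | ME.py | approximate_binary_search
-- ===== SOURCE A (Python) =====
-- def approximate_binary_search(list, value):
-- 	list.sort()
--
-- 	l, r = 0, len(list)
--
-- 	while r - l > 1:
-- 		m = (l + r) // 2
--
-- 		if list[m] <= value:
-- 			l = m
-- 		else:
-- 			r = m
--
-- 	if r == len(list):
-- 		return l
-- 	if abs(value - list[l]) < abs(list[r] - value):
-- 		return l
-- 	return r
-- ===== SOURCE B (Python) =====
-- def approximate_binary_search(list, value):
-- 	list.sort()
--
-- 	l = 0
-- 	for i, x in enumerate(list):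
-- 		if x <= value:
-- 			l = i
--
-- 	r = l + 1
-- 	if r == len(list):
-- 		return l
-- 	if abs(value - list[l]) < abs(list[r] - value):
-- 		return l
-- 	return r
-- ===== Notes on version B (the rewrite author's own statement) =====
-- stated objective: simpler
-- what changed: The O(log n) binary-search loop (with its l/r interval bookkeeping) is replaced by a single linear enumerate scan that records the last index whose element is <= value; the cost stays dominated by the sort, so no speed is claimed.
-- outside the precondition, e.g. on approximate_binary_search([], 0): A returns 0, B raises IndexError
import Mathlib
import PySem

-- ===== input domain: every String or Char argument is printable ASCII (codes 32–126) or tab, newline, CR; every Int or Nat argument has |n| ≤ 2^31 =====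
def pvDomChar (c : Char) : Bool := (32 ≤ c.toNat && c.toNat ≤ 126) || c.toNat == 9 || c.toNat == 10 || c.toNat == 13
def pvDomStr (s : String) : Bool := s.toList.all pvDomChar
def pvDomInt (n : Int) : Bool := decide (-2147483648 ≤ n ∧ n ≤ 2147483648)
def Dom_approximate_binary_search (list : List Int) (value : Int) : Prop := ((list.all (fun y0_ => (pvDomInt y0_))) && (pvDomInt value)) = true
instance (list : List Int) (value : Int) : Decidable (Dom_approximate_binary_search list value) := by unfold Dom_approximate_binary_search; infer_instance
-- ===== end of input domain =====

-- B replaces the binary-search loop by one linear scan for the floor index (simpler; the sort still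
-- dominates, so no speed is claimed). Both A and B sort the argument in place in Python; the
-- equivalence proved here is about the return value.

-- ===== PORT A =====
-- the while loop: state (l, r), returns their final values
def absLoopA (s : List Int) (value : Int) (l r : Int) : Int × Int :=
  if r - l > 1 then
    let m := PySem.Int.floordiv (l + r) 2
    if PySem.List.pyGetD s m 0 ≤ value then absLoopA s value m r
    else absLoopA s value l m
  else (l, r)
termination_by (r - l).toNat
decreasing_by
  · have h2 : PySem.Int.floordiv (l + r) 2 = (l + r) / 2 :=
      PySem.Int.floordiv_eq_ediv_of_pos (by norm_num)
    omega
  · have h2 : PySem.Int.floordiv (l + r) 2 = (l + r) / 2 :=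
      PySem.Int.floordiv_eq_ediv_of_pos (by norm_num)
    omega

def approximate_binary_search (list : List Int) (value : Int) : Int :=
  let s := PySem.List.sorted list (fun x => x) false
  let lr := absLoopA s value 0 (s.length : Int)
  let l := lr.1
  let r := lr.2
  if r = (s.length : Int) then l
  else if |value - PySem.List.pyGetD s l 0| < |PySem.List.pyGetD s r 0 - value| then l
  else r

-- ===== PORT B =====
def approximate_binary_search_alt (list : List Int) (value : Int) : Int :=
  let s := PySem.List.sorted list (fun x => x) false
  let l := (PySem.List.enumerate s 0).foldl
    (fun acc p => if p.2 ≤ value then p.1 else acc) 0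
  let r := l + 1
  if r = (s.length : Int) then l
  else if |value - PySem.List.pyGetD s l 0| < |PySem.List.pyGetD s r 0 - value| then l
  else r

-- ===== PRECONDITION & SPEC =====
-- Pre_ excludes the empty list, on which A returns the meaningless index 0 while B's natural
-- scan-then-index algorithm raises IndexError.
def Pre_approximate_binary_search (list : List Int) (value : Int) : Prop := list ≠ []
instance (list : List Int) (value : Int) : Decidable (Pre_approximate_binary_search list value) := by unfold Pre_approximate_binary_search; infer_instance
def pvWitness_approximate_binary_search : List Int × Int := ([1, 3], 2)

def Spec_approximate_binary_search (list : List Int) (value : Int) (out : Int) : Prop := out = approximate_binary_search_alt list value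
instance (list : List Int) (value : Int) (out : Int) : Decidable (Spec_approximate_binary_search list value out) := by unfold Spec_approximate_binary_search; infer_instance

-- ===== CLAIM (what is proved, stated in full; the proofs are below) =====
def Claim_equal_approximate_binary_search : Prop := ∀ (list : List Int) (value : Int), Dom_approximate_binary_search list value → Pre_approximate_binary_search list value → Spec_approximate_binary_search list value (approximate_binary_search list value)

-- ===== LEMMAS AND PROOFS =====

-- On a (weakly) increasing list, the elements ≤ value are exactly the prefix of length countP.
theorem sorted_le_iff_lt_countP (v : Int) (s : List Int)
    (hp : s.Pairwise (· ≤ ·)) (i : Nat) (hi : i < s.length) :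
    (s[i] ≤ v ↔ i < s.countP (fun x => decide (x ≤ v))) := by
  induction s generalizing i with
  | nil => simp at hi
  | cons x xs ih =>
    rcases List.pairwise_cons.mp hp with ⟨hx, hxs⟩
    have hzero : ¬ x ≤ v → xs.countP (fun y => decide (y ≤ v)) = 0 := by
      intro hxv
      rw [List.countP_eq_zero]
      intro y hy
      have := hx y hy
      simp
      omega
    rw [List.countP_cons]
    cases i with
    | zero =>
      simp only [List.getElem_cons_zero]
      constructor
      · intro h
        have h1 : (if decide (x ≤ v) = true then 1 else 0) = 1 := by simp [h]
        omega
      · intro h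
        by_contra hc
        have h0 := hzero hc
        have h1 : (if decide (x ≤ v) = true then 1 else 0) = 0 := by simp [hc]
        omega
    | succ j =>
      simp only [List.getElem_cons_succ]
      have hj : j < xs.length := by simpa using hi
      rw [ih hxs j hj]
      by_cases hxv : x ≤ v
      · have h1 : (if decide (x ≤ v) = true then 1 else 0) = 1 := by simp [hxv]
        omega
      · have h0 := hzero hxv
        have h1 : (if decide (x ≤ v) = true then 1 else 0) = 0 := by simp [hxv]
        omega

-- The linear scan computes (countP - 1), clamped to 0.
theorem scan_eq (v : Int) (s : List Int) (hp : s.Pairwise (· ≤ ·)) :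
    ∀ (k acc : Int),
    (PySem.List.enumerate s k).foldl (fun acc p => if p.2 ≤ v then p.1 else acc) acc
    = (if s.countP (fun x => decide (x ≤ v)) = 0 then acc
       else k + (s.countP (fun x => decide (x ≤ v)) : Int) - 1) := by
  induction s with
  | nil => intro k acc; simp [PySem.List.enumerate]
  | cons x xs ih =>
    rcases List.pairwise_cons.mp hp with ⟨hx, hxs⟩
    intro k acc
    rw [PySem.List.enumerate_cons, List.foldl_cons, List.countP_cons]
    by_cases hxv : x ≤ v
    · rw [if_pos hxv, ih hxs (k + 1) k]
      by_cases hc : xs.countP (fun x => decide (x ≤ v)) = 0 <;>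
        simp [hc, hxv] <;> push_cast <;> omega
    · have h0 : xs.countP (fun y => decide (y ≤ v)) = 0 := by
        rw [List.countP_eq_zero]
        intro y hy
        have := hx y hy
        simp
        omega
      rw [if_neg hxv, ih hxs (k + 1) acc]
      simp [h0, hxv]

-- The binary-search loop lands on the same index (plus its right neighbour).
theorem loopA_eq (v : Int) (s : List Int) (hp : s.Pairwise (· ≤ ·)) :
    ∀ (fuel : Nat) (l r : Int), (r - l).toNat ≤ fuel → 0 ≤ l → l < r → r ≤ (s.length : Int) →
      (l < (s.countP (fun x => decide (x ≤ v)) : Int) ∨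
        (s.countP (fun x => decide (x ≤ v)) = 0 ∧ l = 0)) →
      (s.countP (fun x => decide (x ≤ v)) : Int) ≤ r →
      absLoopA s v l r =
        (if s.countP (fun x => decide (x ≤ v)) = 0 then ((0 : Int), (1 : Int))
         else ((s.countP (fun x => decide (x ≤ v)) : Int) - 1,
               (s.countP (fun x => decide (x ≤ v)) : Int))) := by
  intro fuel
  induction fuel with
  | zero => intro l r hf h0 hlt hr hl hcr; omega
  | succ f ihf =>
    intro l r hf h0 hlt hr hl hcr
    rw [absLoopA]
    by_cases hlr : r - l > 1
    · simp only [hlr, if_true]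
      have hfd : PySem.Int.floordiv (l + r) 2 = (l + r) / 2 :=
        PySem.Int.floordiv_eq_ediv_of_pos (by norm_num)
      have hml : l < PySem.Int.floordiv (l + r) 2 := by omega
      have hmr : PySem.Int.floordiv (l + r) 2 < r := by omega
      have hm0 : 0 ≤ PySem.Int.floordiv (l + r) 2 := by omega
      have hmlen : PySem.Int.floordiv (l + r) 2 < (s.length : Int) := by omega
      have hget : PySem.List.pyGetD s (PySem.Int.floordiv (l + r) 2) 0
          = s[(PySem.Int.floordiv (l + r) 2).toNat] :=
        PySem.List.pyGetD_eq_getElem s 0 hm0 hmlen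
      have hmn : (PySem.Int.floordiv (l + r) 2).toNat < s.length := by omega
      have hiff := sorted_le_iff_lt_countP v s hp (PySem.Int.floordiv (l + r) 2).toNat hmn
      by_cases hbr : PySem.List.pyGetD s (PySem.Int.floordiv (l + r) 2) 0 ≤ v
      · rw [if_pos hbr]
        rw [hget] at hbr
        have hmc : (PySem.Int.floordiv (l + r) 2) <
            (s.countP (fun x => decide (x ≤ v)) : Int) := by
          have := hiff.mp hbr
          omega
        exact ihf _ _ (by omega) (by omega) hmr hr (Or.inl hmc) hcr
      · rw [if_neg hbr]
        rw [hget] at hbr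
        have hmc : (s.countP (fun x => decide (x ≤ v)) : Int) ≤
            PySem.Int.floordiv (l + r) 2 := by
          by_contra hcon
          exact hbr (hiff.mpr (by omega))
        exact ihf _ _ (by omega) h0 hml (by omega) hl hmc
    · simp only [hlr, if_false]
      have hr1 : r = l + 1 := by omega
      by_cases hc : s.countP (fun x => decide (x ≤ v)) = 0
      · rw [if_pos hc]
        have hl0 : l = 0 := by
          rcases hl with h | h
          · omega
          · exact h.2
        rw [hl0] at hr1
        rw [hl0, hr1]
        norm_num
      · rw [if_neg hc]
        have hcpos : 1 ≤ (s.countP (fun x => decide (x ≤ v)) : Int) := by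
          exact_mod_cast Nat.one_le_iff_ne_zero.mpr hc
        have hleq : l = (s.countP (fun x => decide (x ≤ v)) : Int) - 1 := by
          rcases hl with h | h
          · omega
          · omega
        rw [hleq] at hr1 ⊢
        rw [hr1]
        norm_num

-- ===== VERDICT (by name: the statement is the Claim_ definition above) =====
theorem approximate_binary_search_spec : Claim_equal_approximate_binary_search := by
  intro list v _ hpre
  unfold Spec_approximate_binary_search approximate_binary_search approximate_binary_search_alt
  have hp : (PySem.List.sorted list (fun x => x) false).Pairwise (· ≤ ·) := by
    simpa using PySem.List.sorted_pairwise (xs := list) (key := fun x => x)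
  have hne : PySem.List.sorted list (fun x => x) false ≠ [] := by
    rw [Ne, PySem.List.sorted_eq_nil_iff]; exact hpre
  have hlen : 1 ≤ (PySem.List.sorted list (fun x => x) false).length := by
    cases h : PySem.List.sorted list (fun x => x) false with
    | nil => exact absurd h hne
    | cons a t => simp
  have hcle : (PySem.List.sorted list (fun x => x) false).countP (fun x => decide (x ≤ v))
      ≤ (PySem.List.sorted list (fun x => x) false).length := List.countP_le_length
  have hloop := loopA_eq v (PySem.List.sorted list (fun x => x) false) hp
    ((PySem.List.sorted list (fun x => x) false).length) 0
    ((PySem.List.sorted list (fun x => x) false).length : Int)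
    (by omega) (by omega) (by exact_mod_cast hlen) (le_refl _)
    (by by_cases hc : (PySem.List.sorted list (fun x => x) false).countP
          (fun x => decide (x ≤ v)) = 0
        · exact Or.inr ⟨hc, rfl⟩
        · exact Or.inl (by exact_mod_cast Nat.pos_of_ne_zero hc))
    (by exact_mod_cast hcle)
  have hscan := scan_eq v (PySem.List.sorted list (fun x => x) false) hp 0 0
  simp only [hloop, hscan]
  by_cases hc : (PySem.List.sorted list (fun x => x) false).countP (fun x => decide (x ≤ v)) = 0 <;>
    simp [hc] <;> norm_num
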